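-- pv_equiv track=rewrite | github.com/harshit-vibes/bp-sdk | api/services/yaml_store.py | generate_worker_filenames
-- ===== SOURCE A (Python) =====
-- def generate_worker_filenames(worker_names: list[str]) -> list[str]:
--     """Generate safe filenames for workers.
--
--     Args:
--         worker_names: List of worker names
--
--     Returns:
--         List of safe filenames (e.g., "email-categorizer.yaml")
--     """
--     filenames = []
--     for name in worker_names:
--         # Convert to lowercase, replace spaces with hyphens
--         safe_name = name.lower().replace(" ", "-").replace("_", "-")
--         # Remove any non-alphanumeric characters except hyphens
--         safe_name = "".join(c for c in safe_name if c.isalnum() or c == "-")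
--         # Remove consecutive hyphens
--         while "--" in safe_name:
--             safe_name = safe_name.replace("--", "-")
--         # Remove leading/trailing hyphens
--         safe_name = safe_name.strip("-")
--         filenames.append(f"{safe_name}.yaml")
--     return filenames
-- ===== SOURCE B (Python) =====
-- def _sanitize(name: str) -> str:
--     parts = []
--     prev_hyphen = True  # suppresses leading hyphens
--     for c in name.lower():
--         if c.isalnum():
--             parts.append(c)
--             prev_hyphen = False
--         elif c in " _-" and not prev_hyphen:
--             parts.append("-")
--             prev_hyphen = True
--     if parts and parts[-1] == "-":
--         parts.pop()
--     return "".join(parts) + ".yaml"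
--
--
-- def generate_worker_filenames(worker_names: list[str]) -> list[str]:
--     """Generate safe filenames for workers (single-pass sanitizer)."""
--     return [_sanitize(name) for name in worker_names]
-- ===== Notes on version B (the rewrite author's own statement) =====
-- stated objective: simpler
-- what changed: A sanitizes each name in four separate passes (two single-char replaces, a filter-join, a repeated replace('--','-') while-loop, then strip('-')); B does one left-to-right scan per name keeping a single prev-hyphen flag that deduplicates and left-strips hyphens on the fly, popping at most one trailing hyphen at the end.
import Mathlib
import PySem

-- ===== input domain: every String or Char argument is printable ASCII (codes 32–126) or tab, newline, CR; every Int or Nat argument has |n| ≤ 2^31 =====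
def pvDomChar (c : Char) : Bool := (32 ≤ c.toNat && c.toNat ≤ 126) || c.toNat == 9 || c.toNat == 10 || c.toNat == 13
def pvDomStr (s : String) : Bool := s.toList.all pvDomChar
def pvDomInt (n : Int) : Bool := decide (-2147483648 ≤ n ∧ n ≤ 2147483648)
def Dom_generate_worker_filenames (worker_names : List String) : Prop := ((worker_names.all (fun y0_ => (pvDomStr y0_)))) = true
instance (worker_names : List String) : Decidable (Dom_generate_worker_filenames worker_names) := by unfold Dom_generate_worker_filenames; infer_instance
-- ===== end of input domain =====

-- B replaces A's four passes (two replaces, a filter-join, a while-collapse loop, strip)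
-- by one left-to-right scan with a single prev-hyphen state flag; objective: simpler.

-- ===== PORT A =====
-- the 'while "--" in safe_name' loop, with fuel = the string's length (enough,
-- since each replace that fires strictly shortens the string; the fuel only makes
-- the same computation total)
def pvCollapseA : Nat → List Char → List Char
  | 0, s => s
  | fuel + 1, s =>
    if PySem.Chars.isIn ['-', '-'] s then
      pvCollapseA fuel (PySem.Chars.replace s ['-', '-'] ['-'])
    else s

-- one body of A's for-loop: lower, replace ' '→'-', replace '_'→'-',
-- "".join(c for c in s if c.isalnum() or c == '-') (= filter), collapse loop, strip('-'), + ".yaml"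
def pvSanitizeA (name : String) : String :=
  let s1 := PySem.Chars.replace (PySem.Chars.replace (PySem.Chars.lower name.toList) [' '] ['-']) ['_'] ['-']
  let s2 := s1.filter (fun c => PySem.Chars.isalnum c || c == '-')
  let s3 := pvCollapseA s2.length s2
  let s4 := PySem.Chars.stripChars s3 ['-']
  String.mk (s4 ++ (".yaml".toList))

def generate_worker_filenames (worker_names : List String) : List String :=
  worker_names.foldl (fun filenames name => filenames ++ [pvSanitizeA name]) []

-- ===== PORT B =====
-- one body of B's for-loop: single scan with a prev-hyphen flag, pop a trailing '-'
def pvSanitizeB (name : String) : String :=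
  let r := (PySem.Chars.lower name.toList).foldl
    (fun (st : List Char × Bool) c =>
      if PySem.Chars.isalnum c then (st.1 ++ [c], false)
      else if (c == ' ' || c == '_' || c == '-') && !st.2 then (st.1 ++ ['-'], true)
      else st) ([], true)
  let parts := if r.1 ≠ [] ∧ r.1.getLast? = some '-' then r.1.dropLast else r.1
  String.mk (parts ++ (".yaml".toList))

def generate_worker_filenames_alt (worker_names : List String) : List String :=
  worker_names.map pvSanitizeB

-- ===== PRECONDITION & SPEC =====
def Spec_generate_worker_filenames (worker_names : List String) (out : List String) : Prop := out = generate_worker_filenames_alt worker_names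
instance (worker_names : List String) (out : List String) : Decidable (Spec_generate_worker_filenames worker_names out) := by unfold Spec_generate_worker_filenames; infer_instance

-- ===== CLAIM (what is proved, stated in full; the proofs are below) =====
def Claim_equal_generate_worker_filenames : Prop := ∀ (worker_names : List String), Dom_generate_worker_filenames worker_names → Spec_generate_worker_filenames worker_names (generate_worker_filenames worker_names)

-- ===== LEMMAS AND PROOFS =====

-- squeeze: collapse runs of '-' to a single '-' (the normal form of A's while loop)
def pvSqueeze : List Char → List Char
  | [] => []
  | c :: t => if c = '-' ∧ t.head? = some '-' then pvSqueeze t else c :: pvSqueeze t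

-- one pass of replace s "--" "-" (non-overlapping, left to right)
def pvRep1 : List Char → List Char
  | [] => []
  | c :: t =>
    if c = '-' ∧ t.head? = some '-' then '-' :: pvRep1 t.tail else c :: pvRep1 t
termination_by s => s.length
decreasing_by all_goals simp [List.length_tail]

-- per-char effect of A's lower/replace/replace/filter pipeline
def pvG (c : Char) : Option Char :=
  if PySem.Chars.isalnum c then some c
  else if c = ' ' ∨ c = '_' ∨ c = '-' then some '-' else none

-- B's scan step on the filtered alphabet
def pvStep (st : List Char × Bool) (c : Char) : List Char × Bool :=
  if c = '-' then (if st.2 then st else (st.1 ++ ['-'], true)) else (st.1 ++ [c], false)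

-- lstrip('-') ∘ squeeze of the filtered chars: what B's scan state holds
def pvMid (q : List Char) : List Char := pvSqueeze (q.dropWhile (· = '-'))

theorem pvReplaceGo_single (a b : Char) :
    ∀ (l : List Char) (fuel : Nat) (acc : List Char), l.length ≤ fuel →
      PySem.Chars.replace.go [a] [b] fuel l acc
        = acc.reverse ++ l.map (fun c => if c = a then b else c) := by
  intro l
  induction l with
  | nil => intro fuel acc h; cases fuel <;> rw [PySem.Chars.replace.go] <;> simp
  | cons c t ih =>
    intro fuel acc h
    cases fuel with
    | zero => simp at h
    | succ n =>
      rw [PySem.Chars.replace.go]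
      simp only [List.isPrefixOf, List.length_cons] at *
      by_cases hc : a == c
      · simp only [hc, Bool.true_and, List.isPrefixOf_nil_left, if_pos]
        norm_num
        rw [ih n (b :: acc) (by omega)]
        simp at hc
        simp [hc]
      · simp only [hc, Bool.false_and, Bool.false_eq_true, if_false]
        rw [ih n (c :: acc) (by omega)]
        simp at hc
        simp [Ne.symm hc]
theorem pvReplace_single (a b : Char) (l : List Char) :
    PySem.Chars.replace l [a] [b] = l.map (fun c => if c = a then b else c) := by
  rw [PySem.Chars.replace]
  simp [pvReplaceGo_single a b l l.length [] le_rfl]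

theorem pvReplaceGo_dd :
    ∀ (l : List Char) (fuel : Nat) (acc : List Char), l.length ≤ fuel →
      PySem.Chars.replace.go ['-', '-'] ['-'] fuel l acc = acc.reverse ++ pvRep1 l := by
  intro l
  induction l using pvRep1.induct with
  | case1 =>
    intro fuel acc h; cases fuel <;> rw [PySem.Chars.replace.go] <;> simp [pvRep1]
  | case2 c t hct ih =>
    obtain ⟨hc, hh⟩ := hct
    obtain ⟨t', rfl⟩ : ∃ t', t = '-' :: t' := by
      cases t with
      | nil => simp at hh
      | cons x t' => simp at hh; exact ⟨t', by rw [hh]⟩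
    intro fuel acc h
    cases fuel with
    | zero => simp at h
    | succ n =>
      rw [PySem.Chars.replace.go]
      subst hc
      simp only [List.isPrefixOf, beq_self_eq_true, Bool.true_and, List.isPrefixOf_nil_left,
        if_pos, List.length_cons]
      norm_num
      rw [show PySem.Chars.replace.go ['-', '-'] ['-'] n t' ('-' :: acc) = _ from ih n ('-' :: acc) (by simp at h ⊢; omega)]
      simp [pvRep1]
  | case3 c t hct ih =>
    intro fuel acc h
    cases fuel with
    | zero => simp at h
    | succ n =>
      rw [PySem.Chars.replace.go]
      have hpre : ['-', '-'].isPrefixOf (c :: t) = false := by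
        cases t with
        | nil => simp [List.isPrefixOf]
        | cons x t' =>
          simp [List.isPrefixOf]
          intro h1 h2
          exact hct ⟨h1.symm, by simp [← h2]⟩
      simp only [hpre, Bool.false_eq_true, if_false]
      rw [ih n (c :: acc) (by simp at h ⊢; omega)]
      simp [pvRep1, hct]

theorem pvReplace_dd (l : List Char) :
    PySem.Chars.replace l ['-', '-'] ['-'] = pvRep1 l := by
  rw [PySem.Chars.replace]
  simp [pvReplaceGo_dd l l.length [] le_rfl]

theorem pvSqueeze_head? (l : List Char) : (pvSqueeze l).head? = l.head? := by
  induction l with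
  | nil => rfl
  | cons c t ih =>
    rw [pvSqueeze]
    split
    · rename_i h; rw [ih, h.2, h.1]; simp
    · simp

theorem pvSqueeze_getLast? (l : List Char) : (pvSqueeze l).getLast? = l.getLast? := by
  induction l with
  | nil => rfl
  | cons c t ih =>
    rw [pvSqueeze]
    split
    · rename_i h
      obtain ⟨x, t', rfl⟩ : ∃ x t', t = x :: t' := by
        cases t with
        | nil => exact absurd h.2 (by simp)
        | cons x t' => exact ⟨x, t', rfl⟩
      rw [ih]; simp
    · rename_i h
      cases t with
      | nil => simp [pvSqueeze]
      | cons x t' =>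
        rw [List.getLast?_cons_cons]
        rw [← ih]
        have : pvSqueeze (x :: t') ≠ [] := by
          have := pvSqueeze_head? (x :: t')
          intro hnil; rw [hnil] at this; simp at this
        cases hx : pvSqueeze (x :: t') with
        | nil => exact absurd hx this
        | cons y u => rw [List.getLast?_cons_cons]

theorem pvSqueeze_ne_nil (l : List Char) (h : l ≠ []) : pvSqueeze l ≠ [] := by
  have := pvSqueeze_head? l
  intro hnil; rw [hnil] at this
  cases l with
  | nil => exact h rfl
  | cons c t => simp at this

theorem pvRep1_length_le (l : List Char) : (pvRep1 l).length ≤ l.length := by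
  induction l using pvRep1.induct with
  | case1 => simp [pvRep1]
  | case2 c t h ih =>
    rw [pvRep1, if_pos h]
    simp only [List.length_cons]
    have h2 : t.tail.length ≤ t.length := by simp [List.length_tail]
    omega
  | case3 c t h ih =>
    rw [pvRep1, if_neg h]; simp; omega

theorem pvRep1_length_lt (l : List Char) (h : ['-', '-'] <:+: l) :
    (pvRep1 l).length < l.length := by
  induction l using pvRep1.induct with
  | case1 => simp at h
  | case2 c t hct ih =>
    obtain ⟨hc, hh⟩ := hct
    rw [pvRep1, if_pos ⟨hc, hh⟩]
    obtain ⟨x, t', rfl⟩ : ∃ x t', t = x :: t' := by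
      cases t with
      | nil => simp at hh
      | cons x t' => exact ⟨x, t', rfl⟩
    have := pvRep1_length_le t'
    simp at *
    omega
  | case3 c t hct ih =>
    rw [pvRep1, if_neg hct]
    rw [List.infix_cons_iff] at h
    rcases h with hpre | hinf
    · exfalso
      cases t with
      | nil => simp [List.IsPrefix] at hpre
      | cons x t' =>
        rw [List.cons_prefix_cons] at hpre
        obtain ⟨h1, h2⟩ := hpre
        rw [List.cons_prefix_cons] at h2
        exact hct ⟨h1.symm, by rw [← h2.1]; rfl⟩
    · have := ih hinf; simp; omega

theorem pvRep1_head? (l : List Char) : (pvRep1 l).head? = l.head? := by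
  cases l with
  | nil => rw [pvRep1]
  | cons c t =>
    rw [pvRep1]
    split
    · rename_i h; simp [h.1]
    · simp

theorem pvSqueeze_rep1 (l : List Char) : pvSqueeze (pvRep1 l) = pvSqueeze l := by
  induction l using pvRep1.induct with
  | case1 => rw [pvRep1]
  | case2 c t hct ih =>
    obtain ⟨hc, hh⟩ := hct
    obtain ⟨x, t', rfl⟩ : ∃ x t', t = x :: t' := by
      cases t with
      | nil => simp at hh
      | cons x t' => exact ⟨x, t', rfl⟩
    simp only [List.head?_cons, Option.some_inj] at hh
    subst hc; subst hh
    simp only [List.tail_cons] at ih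
    have e1 : pvRep1 ('-' :: '-' :: t') = '-' :: pvRep1 t' := by
      rw [pvRep1]; simp
    have e2 : pvSqueeze ('-' :: '-' :: t') = pvSqueeze ('-' :: t') := by
      rw [pvSqueeze]; simp
    rw [e1, e2, pvSqueeze, pvSqueeze, pvRep1_head?, ih]
  | case3 c t hct ih =>
    rw [pvRep1, if_neg hct]
    rw [pvSqueeze, pvRep1_head?]
    rw [pvSqueeze]
    split
    · rename_i h; exact absurd h hct
    · rw [ih]

theorem pvSqueeze_of_no_dd (l : List Char) (h : ¬ ['-', '-'] <:+: l) : pvSqueeze l = l := by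
  induction l with
  | nil => rfl
  | cons c t ih =>
    rw [pvSqueeze]
    split
    · rename_i hc
      exfalso
      obtain ⟨x, t', rfl⟩ : ∃ x t', t = x :: t' := by
        cases t with
        | nil => exact absurd hc.2 (by simp)
        | cons x t' => exact ⟨x, t', rfl⟩
      simp only [List.head?_cons, Option.some_inj] at hc
      exact h ⟨[], t', by simp [hc.1, hc.2]⟩
    · rw [ih (fun hinf => h (List.infix_cons hinf))]

theorem pvNo_dd_squeeze (l : List Char) : ¬ ['-', '-'] <:+: pvSqueeze l := by
  induction l with
  | nil => simp [pvSqueeze]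
  | cons c t ih =>
    rw [pvSqueeze]
    split
    · exact ih
    · rename_i hc
      intro hinf
      rw [List.infix_cons_iff] at hinf
      rcases hinf with hpre | hinf
      · rw [List.cons_prefix_cons] at hpre
        obtain ⟨h1, h2⟩ := hpre
        apply hc
        refine ⟨h1.symm, ?_⟩
        have hh := pvSqueeze_head? t
        cases hs : pvSqueeze t with
        | nil => rw [hs] at h2; simp [List.IsPrefix] at h2
        | cons y u =>
          rw [hs] at h2 hh
          rw [List.cons_prefix_cons] at h2
          rw [← hh]; simp [← h2.1]
      · exact ih hinf

theorem pvCollapseA_eq_squeeze : ∀ (fuel : Nat) (s : List Char), s.length ≤ fuel →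
    pvCollapseA fuel s = pvSqueeze s := by
  intro fuel
  induction fuel with
  | zero =>
    intro s h
    have : s = [] := by cases s <;> simp_all
    subst this; rfl
  | succ n ih =>
    intro s h
    rw [pvCollapseA]
    by_cases hin : PySem.Chars.isIn ['-', '-'] s
    · rw [if_pos hin, pvReplace_dd]
      have hdd : ['-', '-'] <:+: s := (PySem.Chars.isIn_iff_infix _ _).mp hin
      rw [ih _ (by have := pvRep1_length_lt s hdd; omega)]
      exact pvSqueeze_rep1 s
    · rw [if_neg hin]
      exact (pvSqueeze_of_no_dd s ((PySem.Chars.isIn_eq_false_iff _ _).mp (by simpa using hin))).symm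

theorem pvSqueeze_dropWhile (l : List Char) :
    (pvSqueeze l).dropWhile (· = '-') = pvSqueeze (l.dropWhile (· = '-')) := by
  induction l with
  | nil => rfl
  | cons c t ih =>
    by_cases hc : c = '-'
    · subst hc
      have lhs : List.dropWhile (· = '-') (pvSqueeze ('-' :: t))
          = List.dropWhile (· = '-') (pvSqueeze t) := by
        rw [pvSqueeze]
        split
        · rfl
        · rw [List.dropWhile_cons]; simp
      rw [lhs, ih, List.dropWhile_cons]
      simp
    · rw [pvSqueeze, if_neg (fun h => hc h.1)]
      rw [List.dropWhile_cons, if_neg (by simpa using hc)]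
      rw [List.dropWhile_cons, if_neg (by simpa using hc)]
      rw [pvSqueeze, if_neg (fun h => hc h.1)]

theorem pvRstrip_no_dd (u : List Char) (h : ¬ ['-', '-'] <:+: u) :
    (u.reverse.dropWhile (· = '-')).reverse
      = if u.getLast? = some '-' then u.dropLast else u := by
  rcases List.eq_nil_or_concat u with rfl | ⟨w, c, rfl⟩
  · simp
  · rw [List.concat_eq_append] at *
    rw [List.reverse_append, List.reverse_singleton, List.singleton_append]
    by_cases hc : c = '-'
    · subst hc
      rw [List.dropWhile_cons, if_pos (by simp)]
      rw [if_pos (by simp)]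
      have hw : List.dropWhile (· = '-') w.reverse = w.reverse := by
        rcases List.eq_nil_or_concat w with rfl | ⟨w', d, rfl⟩
        · simp
        · rw [List.concat_eq_append] at *
          rw [List.reverse_append, List.reverse_singleton, List.singleton_append,
            List.dropWhile_cons]
          have hd : d ≠ '-' := by
            intro hd; subst hd
            exact h ⟨w', [], by simp⟩
          rw [if_neg (by simpa using hd)]
      rw [hw, List.reverse_reverse, List.dropLast_concat]
    · rw [List.dropWhile_cons, if_neg (by simpa using hc)]
      rw [if_neg (by simp [hc])]
      rw [← List.reverse_concat, List.reverse_reverse]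

theorem pvSqueeze_concat_ne (u : List Char) (c : Char) (hc : c ≠ '-') :
    pvSqueeze (u ++ [c]) = pvSqueeze u ++ [c] := by
  induction u with
  | nil => simp [pvSqueeze]
  | cons a u' ih =>
    rw [List.cons_append, pvSqueeze, pvSqueeze]
    cases u' with
    | nil =>
      simp only [List.nil_append, List.head?_cons, List.head?_nil]
      rw [if_neg (fun hh => hc (by simpa using hh.2))]
      simp [pvSqueeze, ih]
    | cons b u'' =>
      simp only [List.cons_append, List.head?_cons]
      split
      · exact ih
      · rw [← List.cons_append, ih]; simp

theorem pvSqueeze_concat_dash (u : List Char) :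
    pvSqueeze (u ++ ['-'])
      = if u.getLast? = some '-' then pvSqueeze u else pvSqueeze u ++ ['-'] := by
  induction u with
  | nil => simp [pvSqueeze]
  | cons a u' ih =>
    rw [List.cons_append, pvSqueeze, pvSqueeze]
    cases u' with
    | nil =>
      by_cases ha : a = '-'
      · subst ha; simp [pvSqueeze]
      · simp [pvSqueeze, ha]
    | cons b u'' =>
      simp only [List.cons_append, List.head?_cons]
      rw [List.getLast?_cons_cons]
      split
      · exact ih
      · rw [show b :: (u'' ++ ['-']) = b :: u'' ++ ['-'] by simp, ih]
        split
        · rfl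
        · simp

theorem pvFold_inv (q : List Char) :
    q.foldl pvStep ([], true)
      = (pvMid q, (pvMid q).isEmpty || ((pvMid q).getLast? == some '-')) := by
  induction q using List.reverseRecOn with
  | nil => simp [pvMid, pvSqueeze]
  | append_singleton q c ih =>
    rw [List.foldl_append, List.foldl_cons, List.foldl_nil, ih]
    by_cases hc : c = '-'
    · subst hc
      rw [pvStep, if_pos rfl]
      have hdw : (q ++ ['-']).dropWhile (· = '-')
          = if (q.dropWhile (· = '-')).isEmpty then [] else q.dropWhile (· = '-') ++ ['-'] := by
        rw [List.dropWhile_append]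
        split
        · simp [List.dropWhile]
        · rfl
      by_cases hq : (q.dropWhile (· = '-')).isEmpty
      · -- mid q = [], flag true, state unchanged
        have hmid : pvMid q = [] := by
          unfold pvMid
          rw [List.isEmpty_iff] at hq
          rw [hq]; rfl
        have hmid' : pvMid (q ++ ['-']) = [] := by
          unfold pvMid
          rw [hdw, if_pos (by simpa using hq)]; rfl
        simp [hmid, hmid']
      · have hne : q.dropWhile (· = '-') ≠ [] := by simpa [List.isEmpty_iff] using hq
        have hmq : pvMid q ≠ [] := pvSqueeze_ne_nil _ hne
        have hmid' : pvMid (q ++ ['-'])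
            = if (q.dropWhile (· = '-')).getLast? = some '-' then pvMid q else pvMid q ++ ['-'] := by
          unfold pvMid
          rw [hdw, if_neg (by simpa [List.isEmpty_iff] using hq), pvSqueeze_concat_dash]
        have hlast : (pvMid q).getLast? = (q.dropWhile (· = '-')).getLast? := pvSqueeze_getLast? _
        by_cases hl : (q.dropWhile (· = '-')).getLast? = some '-'
        · -- flag is true: state unchanged
          have hflag : ((pvMid q).isEmpty || ((pvMid q).getLast? == some '-')) = true := by
            rw [hlast, hl]; simp
          rw [hflag, if_pos rfl]
          rw [hmid', if_pos hl]
          rw [hflag]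
        · have hflag : ((pvMid q).isEmpty || ((pvMid q).getLast? == some '-')) = false := by
            rw [hlast]
            simp [List.isEmpty_iff, hmq, hl]
          rw [hflag]
          simp only [Bool.false_eq_true, if_false]
          rw [hmid', if_neg hl]
          have : (pvMid q ++ ['-']).getLast? = some '-' := by simp
          simp [this]
    · rw [pvStep, if_neg hc]
      have hmid' : pvMid (q ++ [c]) = pvMid q ++ [c] := by
        unfold pvMid
        rw [List.dropWhile_append]
        split
        · rename_i hq
          rw [List.isEmpty_iff] at hq
          rw [List.dropWhile_cons, if_neg (by simpa using hc), hq]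
          simp [pvSqueeze]
        · rw [pvSqueeze_concat_ne _ _ hc]
      rw [hmid']
      have : (pvMid q ++ [c]).getLast? = some c := by simp
      simp [this, hc]

theorem pvAlnum_ne_space {c : Char} (h : PySem.Chars.isalnum c = true) : c ≠ ' ' := by
  intro e; subst e; exact absurd h (by decide)
theorem pvAlnum_ne_us {c : Char} (h : PySem.Chars.isalnum c = true) : c ≠ '_' := by
  intro e; subst e; exact absurd h (by decide)
theorem pvAlnum_ne_dash {c : Char} (h : PySem.Chars.isalnum c = true) : c ≠ '-' := by
  intro e; subst e; exact absurd h (by decide)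

theorem pvFilter_map_eq_filterMap (l : List Char) :
    ((l.map (fun c => if (if c = ' ' then '-' else c) = '_' then '-' else if c = ' ' then '-' else c)).filter
        (fun c => PySem.Chars.isalnum c || c == '-'))
      = l.filterMap pvG := by
  induction l with
  | nil => rfl
  | cons c t ih =>
    rw [List.map_cons, List.filter_cons, List.filterMap_cons]
    by_cases h1 : PySem.Chars.isalnum c
    · rw [if_neg (pvAlnum_ne_space h1), if_neg (pvAlnum_ne_us h1)]
      simp [pvG, h1, ih]
    · by_cases h2 : c = ' ' ∨ c = '_' ∨ c = '-'
      · have e : (if (if c = ' ' then '-' else c) = '_' then '-' else if c = ' ' then '-' else c) = '-' := by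
          rcases h2 with rfl | rfl | rfl <;> simp
        rw [e]
        simp [pvG, h1, h2, ih]
      · push_neg at h2
        obtain ⟨hs, hu, hd⟩ := h2
        rw [if_neg hs, if_neg hu]
        simp [pvG, h1, hs, hu, hd, ih]

theorem pvFoldB_eq_foldStep (l : List Char) (st : List Char × Bool) :
    l.foldl (fun (st : List Char × Bool) c =>
      if PySem.Chars.isalnum c then (st.1 ++ [c], false)
      else if (c == ' ' || c == '_' || c == '-') && !st.2 then (st.1 ++ ['-'], true)
      else st) st
    = (l.filterMap pvG).foldl pvStep st := by
  induction l generalizing st with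
  | nil => rfl
  | cons c t ih =>
    rw [List.foldl_cons, List.filterMap_cons]
    by_cases h1 : PySem.Chars.isalnum c
    · simp only [pvG, h1, if_true, List.foldl_cons, pvStep, if_neg (pvAlnum_ne_dash h1)]
      exact ih _
    · by_cases h2 : c = ' ' ∨ c = '_' ∨ c = '-'
      · have e : (c == ' ' || c == '_' || c == '-') = true := by
          rcases h2 with rfl | rfl | rfl <;> simp
        have hg : pvG c = some '-' := by rw [pvG, if_neg h1, if_pos h2]
        rw [hg, List.foldl_cons, ih]
        congr 1
        rw [pvStep, if_pos rfl, if_neg h1]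
        cases hst : st.2 <;> simp [hst, e]
      · push_neg at h2
        obtain ⟨hs, hu, hd⟩ := h2
        have e : (c == ' ' || c == '_' || c == '-') = false := by simp [hs, hu, hd]
        simp only [pvG, h1, if_false, if_neg (show ¬(c = ' ' ∨ c = '_' ∨ c = '-') by tauto), e,
          Bool.false_and, Bool.false_eq_true]
        exact ih _

theorem pvContains_dash : (fun c => List.contains ['-'] c) = (fun c : Char => decide (c = '-')) := by
  funext c
  by_cases h : c = '-' <;> simp [h]

theorem pvSanitize_eq (name : String) : pvSanitizeA name = pvSanitizeB name := by
  unfold pvSanitizeA pvSanitizeB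
  rw [pvFoldB_eq_foldStep, pvFold_inv]
  dsimp only
  rw [pvReplace_single, pvReplace_single, List.map_map]
  have hcomp : ((fun c => if c = '_' then '-' else c) ∘ fun c => if c = ' ' then '-' else c)
      = (fun c => if (if c = ' ' then '-' else c) = '_' then '-' else if c = ' ' then '-' else c) := by
    funext c
    by_cases h : c = ' ' <;> simp [h]
  rw [hcomp, pvFilter_map_eq_filterMap]
  set q := (PySem.Chars.lower name.toList).filterMap pvG with hq
  rw [pvCollapseA_eq_squeeze q.length q le_rfl]
  rw [PySem.Chars.stripChars]
  rw [pvContains_dash]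
  rw [show (List.dropWhile (fun c : Char => decide (c = '-')) (pvSqueeze q)) = pvMid q from
    pvSqueeze_dropWhile q]
  rw [pvRstrip_no_dd (pvMid q) (pvNo_dd_squeeze _)]
  congr 1
  by_cases hg : (pvMid q).getLast? = some '-'
  · have hne : pvMid q ≠ [] := by intro h; rw [h] at hg; simp at hg
    rw [if_pos hg, if_pos ⟨hne, hg⟩]
  · rw [if_neg hg, if_neg (fun h => hg h.2)]

-- ===== VERDICT (by name: the statement is the Claim_ definition above) =====
theorem generate_worker_filenames_spec : Claim_equal_generate_worker_filenames := by
  intro worker_names _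
  unfold Spec_generate_worker_filenames generate_worker_filenames generate_worker_filenames_alt
  rw [PySem.List.foldl_append_singleton_eq_map]
  exact List.map_congr_left (fun x _ => pvSanitize_eq x)
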